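-- pv_equiv track=rewrite | github.com/asdsyd/IITM-Diploma | Python/OPPEmock/four.py | exact_count
-- ===== SOURCE A (Python) =====
-- def exact_count(para, n):
--     Dee = dict()
--     for word in para.split(' '):
--
--         if word not in Dee:
--             Dee[word] = 0
--         Dee[word] += 1
--
--     for word in Dee:
--         if Dee[word] == n:
--             return True
--
--     return False
-- ===== SOURCE B (Python) =====
-- def exact_count(para, n):
--     def go(ws):
--         if not ws:
--             return False
--         w = ws[0]
--         rest = [x for x in ws if x != w]
--         return (len(ws) - len(rest) == n) or go(rest)
--     return go(para.split(' '))
-- ===== Notes on version B (the rewrite author's own statement) =====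
-- stated objective: alternative
-- what changed: Replaces A's frequency-dict pass plus dict scan with a recursive partition-and-remove scheme: repeatedly strip all occurrences of the first remaining word, derive its count from the length drop, and recurse on the shrunken list; no counting table is ever built.
import Mathlib
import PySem

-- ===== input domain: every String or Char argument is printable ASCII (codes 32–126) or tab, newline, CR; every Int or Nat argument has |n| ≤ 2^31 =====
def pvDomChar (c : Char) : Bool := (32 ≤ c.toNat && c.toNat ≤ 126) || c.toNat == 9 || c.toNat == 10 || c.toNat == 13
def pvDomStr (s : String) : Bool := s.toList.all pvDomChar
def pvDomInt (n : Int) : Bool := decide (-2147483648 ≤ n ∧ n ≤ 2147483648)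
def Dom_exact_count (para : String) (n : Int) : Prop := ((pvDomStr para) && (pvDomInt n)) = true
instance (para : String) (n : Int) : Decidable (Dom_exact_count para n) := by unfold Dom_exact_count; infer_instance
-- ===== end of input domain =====

-- B replaces A's frequency-dict-then-scan with a recursive partition-and-remove scheme (objective: alternative, not faster).

-- ===== PORT A =====
def exact_count (para : String) (n : Int) : Bool :=
  let dee := ((PySem.Str.split? para " ").getD []).foldl
    (fun d w => (if d.contains w then d else d.insert w 0).modify w 0 (· + 1))
    PySem.Dict.empty
  dee.keys.any (fun w => dee.getD w 0 == n)

-- ===== PORT B =====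
-- go: strip all occurrences of the first word; its count is the length drop; recurse on the rest.
def exact_count_alt_go (n : Int) : List String → Bool
  | [] => false
  | w :: t =>
    let rest := (w :: t).filter (fun x => x != w)
    ((((w :: t).length : Int) - (rest.length : Int)) == n) || exact_count_alt_go n rest
  termination_by ws => ws.length
  decreasing_by
    simp only [List.filter_cons, bne_self_eq_false, List.length_cons]
    exact Nat.lt_succ_of_le (List.length_filter_le _ _)

def exact_count_alt (para : String) (n : Int) : Bool :=
  exact_count_alt_go n ((PySem.Str.split? para " ").getD [])

-- ===== PRECONDITION & SPEC =====
def Spec_exact_count (para : String) (n : Int) (out : Bool) : Prop := out = exact_count_alt para n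
instance (para : String) (n : Int) (out : Bool) : Decidable (Spec_exact_count para n out) := by unfold Spec_exact_count; infer_instance

-- ===== CLAIM (what is proved, stated in full; the proofs are below) =====
def Claim_equal_exact_count : Prop := ∀ (para : String) (n : Int), Dom_exact_count para n → Spec_exact_count para n (exact_count para n)

-- ===== LEMMAS AND PROOFS =====

-- A's "if word not in Dee: Dee[word] = 0; Dee[word] += 1" step is exactly Counter's modify step.
theorem step_eq (d : PySem.Dict String Int) (w : String) :
    (if d.contains w then d else d.insert w 0).modify w 0 (· + 1) = d.modify w 0 (· + 1) := by
  by_cases h : d.contains w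
  · simp [h]
  · simp only [h, Bool.false_eq_true, if_false]
    have h' : (d.items.any fun p => p.1 == w) = false := by
      rw [← Bool.not_eq_true]; exact h
    have hmem : ∀ p ∈ d.items, ¬ p.1 = w := by
      intro p hp
      have := List.any_eq_false.mp h' p hp
      simpa using this
    have hfind : d.items.find? (fun p => p.1 == w) = none := by
      simp [List.find?_eq_none]
      intro a b hp
      exact hmem (a, b) hp
    simp [PySem.Dict.modify, PySem.Dict.insert, PySem.Dict.contains, PySem.Dict.getD,
      PySem.Dict.get?, h', hfind, List.find?_append]
    ext1
    rw [List.map_congr_left (g := id)]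
    · simp
    · intro p hp
      simp [hmem p hp]

-- A returns true iff some word of the list has count n.
theorem a_iff (para : String) (n : Int) :
    exact_count para n = true ↔
      ∃ x ∈ (PySem.Str.split? para " ").getD [], ((List.count x ((PySem.Str.split? para " ").getD []) : Int) = n) := by
  unfold exact_count
  have hf : (fun (d : PySem.Dict String Int) w =>
      (if d.contains w then d else d.insert w 0).modify w 0 (· + 1)) =
      (fun d w => d.modify w 0 (· + 1)) := by
    funext d w; exact step_eq d w
  rw [hf, ← PySem.Dict.counter_eq_foldl]
  simp only [PySem.Dict.keys_counter, List.any_eq_true, PySem.Dict.getD_counter, beq_iff_eq]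
  constructor
  · rintro ⟨x, hx, hc⟩
    exact ⟨x, (PySem.Set.mem_ofList _ _).mp hx, by simpa [PySem.List.count] using hc⟩
  · rintro ⟨x, hx, hc⟩
    exact ⟨x, (PySem.Set.mem_ofList _ _).mpr hx, by simpa [PySem.List.count] using hc⟩

-- head's count equals the length removed by filtering it out
theorem head_count (w : String) (t : List String) :
    ((((w :: t).length : Int)) - (((w :: t).filter (fun x => x != w)).length : Int)) =
      (List.count w (w :: t) : Int) := by
  have h := List.length_eq_countP_add_countP (p := fun x => x == w) (l := w :: t)
  have hfl : ((w :: t).filter (fun x => x != w)).length =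
      List.countP (fun a => decide ¬((a == w) = true)) (w :: t) := by
    rw [List.countP_eq_length_filter]
    congr 1
    apply List.filter_congr
    intro a _
    by_cases hav : a = w <;> simp [bne, hav]
  have hc : List.count w (w :: t) = List.countP (fun x => x == w) (w :: t) := by
    simp [List.count_eq_countP]
  rw [hfl, hc]
  omega

-- B's recursion returns true iff some word of the list has count n.
theorem go_iff (n : Int) (ws : List String) :
    exact_count_alt_go n ws = true ↔ ∃ x ∈ ws, ((List.count x ws : Int) = n) := by
  induction ws using exact_count_alt_go.induct with
  | case1 => simp [exact_count_alt_go]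
  | case2 w t rest ih =>
    simp only [rest] at ih
    rw [exact_count_alt_go]
    rw [Bool.or_eq_true, ih, beq_iff_eq]
    constructor
    · rintro (h | ⟨x, hx, hc⟩)
      · exact ⟨w, List.mem_cons_self, by rw [← head_count w t]; simpa using h⟩
      · rcases List.mem_filter.mp hx with ⟨hxm, hxw⟩
        refine ⟨x, hxm, ?_⟩
        rw [← hc, List.count_filter (p := fun y => y != w) hxw]
    · rintro ⟨x, hx, hc⟩
      by_cases hxw : x = w
      · subst hxw
        left
        rw [← hc, ← head_count x t]
      · right
        refine ⟨x, List.mem_filter.mpr ⟨hx, by simpa using hxw⟩, ?_⟩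
        rw [← hc]
        rw [List.count_filter (p := fun y => y != w) (by simpa using hxw)]

theorem exact_count_eq (para : String) (n : Int) :
    exact_count para n = exact_count_alt para n := by
  rw [Bool.eq_iff_iff, a_iff]
  exact (go_iff n _).symm

-- ===== VERDICT (by name: the statement is the Claim_ definition above) =====
theorem exact_count_spec : Claim_equal_exact_count := by
  intro para n _
  unfold Spec_exact_count
  exact exact_count_eq para n
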